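-- pv_equiv track=rewrite | github.com/bakajstep/KNN_Project2024 | parsers/slavic/slavic_bsnlp.py | convert_to_conll
-- ===== SOURCE A (Python) =====
-- def convert_to_conll(annotations, raw_text):
--     conll_lines = []
--     sentences = raw_text.split('. ')
--     line_number = 0
--     for sentence in sentences:
--         tokens = sentence.split()
--         prev_tag = 'O'
--         for token in tokens:
--             if token.endswith('.'):
--                 token = token[:-1]
--             tag = annotations.get(token, 'O')
--             bio_tag = 'B-' + tag if tag != 'O' and (
--                     prev_tag == 'O' or prev_tag != tag) else 'I-' + tag if tag != 'O' else 'O'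
--             conll_lines.append(f"{line_number}\t{token}\t_\t_\t_\t_\t_\t_\t_\t{bio_tag}")
--             prev_tag = tag
--             line_number += 1
--         conll_lines.append("")
--     return "\n".join(conll_lines)
-- ===== SOURCE B (Python) =====
-- def convert_to_conll(annotations, raw_text):
--     # Pass 1: per sentence, a table of (normalized token, tag) pairs.
--     tables = []
--     for sentence in raw_text.split('. '):
--         pairs = []
--         for token in sentence.split():
--             tok = token[:-1] if token.endswith('.') else token
--             pairs.append((tok, annotations.get(tok, 'O')))
--         tables.append(pairs)
--     # Pass 2: derive BIO labels by comparing each tag with its predecessor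
--     # (sentence-start sentinel 'O'), via zip against the shifted tag column.
--     rows = []
--     for pairs in tables:
--         tags = [t for _, t in pairs]
--         labeled = []
--         for (tok, tag), prev in zip(pairs, ['O'] + tags):
--             if tag == 'O':
--                 bio = 'O'
--             elif tag != prev:
--                 bio = 'B-' + tag
--             else:
--                 bio = 'I-' + tag
--             labeled.append((tok, bio))
--         rows.append(labeled)
--     # Pass 3: number every row with one running counter and join.
--     out = []
--     n = 0
--     for labeled in rows:
--         for tok, bio in labeled:
--             out.append(f"{n}\t{tok}\t_\t_\t_\t_\t_\t_\t_\t{bio}")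
--             n += 1
--         out.append("")
--     return "\n".join(out)
-- ===== Notes on version B (the rewrite author's own statement) =====
-- stated objective: alternative
-- what changed: Replaces A's single stateful token loop (carrying prev_tag and line_number through one fold) with three separate passes: build per-sentence (token, tag) tables, derive BIO labels by zipping each tag column against its shifted copy with an 'O' sentinel, then number and join all rows with one running counter.
import Mathlib
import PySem

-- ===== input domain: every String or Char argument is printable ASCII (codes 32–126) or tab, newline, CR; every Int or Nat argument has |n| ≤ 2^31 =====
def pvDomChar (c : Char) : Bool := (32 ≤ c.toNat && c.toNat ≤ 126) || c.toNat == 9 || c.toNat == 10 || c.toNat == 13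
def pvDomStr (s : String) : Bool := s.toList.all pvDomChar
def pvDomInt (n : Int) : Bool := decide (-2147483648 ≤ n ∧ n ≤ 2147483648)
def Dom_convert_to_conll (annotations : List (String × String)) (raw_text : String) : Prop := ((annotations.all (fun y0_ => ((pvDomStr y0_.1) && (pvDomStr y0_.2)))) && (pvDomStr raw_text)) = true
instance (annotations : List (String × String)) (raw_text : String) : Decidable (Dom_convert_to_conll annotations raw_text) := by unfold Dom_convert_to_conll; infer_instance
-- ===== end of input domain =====

-- B is an alternative decomposition: three passes (token/tag tables, BIO labels by
-- zipping the tag column with its shifted copy, then numbering) instead of A's single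
-- stateful loop carrying prev_tag and line_number together.

-- the shared f-string  f"{n}\t{token}\t_..._\t{bio}"
def mkLine (n : Int) (tok bio : String) : String :=
  PySem.Int.toStr n ++ "\t" ++ tok ++ "\t_\t_\t_\t_\t_\t_\t_\t" ++ bio

-- ===== PORT A =====
def convert_to_conll (annotations : List (String × String)) (raw_text : String) : String :=
  let sentences := (PySem.Str.split? raw_text ". ").getD []
  let res : List String × Int := sentences.foldl (fun (st : List String × Int) sentence =>
      let tokens := PySem.Str.split₀ sentence
      let r := tokens.foldl (fun (st2 : List String × String × Int) token =>
          let token := if PySem.Str.endswith token "." then PySem.Str.slice token none (some (-1)) else token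
          let tag := (PySem.Dict.mk annotations).getD token "O"
          let bio_tag := if tag ≠ "O" ∧ (st2.2.1 = "O" ∨ st2.2.1 ≠ tag) then "B-" ++ tag
                         else if tag ≠ "O" then "I-" ++ tag else "O"
          (st2.1 ++ [mkLine st2.2.2 token bio_tag], tag, st2.2.2 + 1)) (st.1, "O", st.2)
      (r.1 ++ [""], r.2.2)) (([], 0) : List String × Int)
  PySem.Str.join "\n" res.1

-- ===== PORT B =====
-- pass 1: per-sentence table of (normalized token, tag) pairs
def tokenTags (annotations : List (String × String)) (sentence : String) : List (String × String) :=
  (PySem.Str.split₀ sentence).map (fun token =>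
    let tok := if PySem.Str.endswith token "." then PySem.Str.slice token none (some (-1)) else token
    (tok, (PySem.Dict.mk annotations).getD tok "O"))

-- pass 2: BIO label from a tag and its predecessor
def bioLabel (prev tag : String) : String :=
  if tag = "O" then "O" else if tag ≠ prev then "B-" ++ tag else "I-" ++ tag

def labRows (prev : String) (pairs : List (String × String)) : List (String × String) :=
  (pairs.zip (prev :: pairs.map Prod.snd)).map (fun pr => (pr.1.1, bioLabel pr.2 pr.1.2))

def convert_to_conll_alt (annotations : List (String × String)) (raw_text : String) : String :=
  let tables := ((PySem.Str.split? raw_text ". ").getD []).map (tokenTags annotations)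
  let rows := tables.map (labRows "O")
  let res : List String × Int := rows.foldl (fun (st : List String × Int) labeled =>
      let r := labeled.foldl (fun (st2 : List String × Int) tb =>
          (st2.1 ++ [mkLine st2.2 tb.1 tb.2], st2.2 + 1)) st
      (r.1 ++ [""], r.2)) (([], 0) : List String × Int)
  PySem.Str.join "\n" res.1

-- ===== PRECONDITION & SPEC =====
def Spec_convert_to_conll (annotations : List (String × String)) (raw_text : String) (out : String) : Prop := out = convert_to_conll_alt annotations raw_text
instance (annotations : List (String × String)) (raw_text : String) (out : String) : Decidable (Spec_convert_to_conll annotations raw_text out) := by unfold Spec_convert_to_conll; infer_instance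

-- ===== CLAIM (what is proved, stated in full; the proofs are below) =====
def Claim_equal_convert_to_conll : Prop := ∀ (annotations : List (String × String)) (raw_text : String), Dom_convert_to_conll annotations raw_text → Spec_convert_to_conll annotations raw_text (convert_to_conll annotations raw_text)

-- ===== LEMMAS AND PROOFS =====

-- A's bio expression equals B's bioLabel
lemma bio_eq (prev tag : String) :
    (if tag ≠ "O" ∧ (prev = "O" ∨ prev ≠ tag) then "B-" ++ tag
     else if tag ≠ "O" then "I-" ++ tag else "O") = bioLabel prev tag := by
  unfold bioLabel
  by_cases h : tag = "O"
  · simp [h]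
  · by_cases hp : prev = tag
    · simp [h, hp]
    · simp [h, hp, Ne.symm hp]

lemma labRows_cons (prev : String) (p : String × String) (ps : List (String × String)) :
    labRows prev (p :: ps) = (p.1, bioLabel prev p.2) :: labRows p.2 ps := by
  simp [labRows, List.zip]

-- inner loop: A's stateful token fold equals B's labeled-row numbering fold
lemma inner_eq (annotations : List (String × String)) :
    ∀ (tokens : List String) (prev : String) (lines : List String) (n : Int),
    tokens.foldl (fun (st2 : List String × String × Int) token =>
        let token := if PySem.Str.endswith token "." then PySem.Str.slice token none (some (-1)) else token
        let tag := (PySem.Dict.mk annotations).getD token "O"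
        let bio_tag := if tag ≠ "O" ∧ (st2.2.1 = "O" ∨ st2.2.1 ≠ tag) then "B-" ++ tag
                       else if tag ≠ "O" then "I-" ++ tag else "O"
        (st2.1 ++ [mkLine st2.2.2 token bio_tag], tag, st2.2.2 + 1)) (lines, prev, n)
    = (let r := (labRows prev (tokens.map (fun token =>
          let tok := if PySem.Str.endswith token "." then PySem.Str.slice token none (some (-1)) else token
          (tok, (PySem.Dict.mk annotations).getD tok "O")))).foldl
          (fun (st2 : List String × Int) tb => (st2.1 ++ [mkLine st2.2 tb.1 tb.2], st2.2 + 1)) (lines, n)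
       (r.1, ((tokens.map (fun token =>
          let tok := if PySem.Str.endswith token "." then PySem.Str.slice token none (some (-1)) else token
          (PySem.Dict.mk annotations).getD tok "O")).foldl (fun _ x => x) prev), r.2)) := by
  intro tokens
  induction tokens with
  | nil => intro prev lines n; simp [labRows]
  | cons t ts ih =>
    intro prev lines n
    simp only [List.foldl_cons, List.map_cons]
    rw [labRows_cons]
    simp only [List.foldl_cons]
    rw [ih]
    rw [bio_eq]

-- outer loop equality
lemma outer_eq (annotations : List (String × String)) (sentences : List String) :
    ∀ (lines : List String) (n : Int),
    sentences.foldl (fun (st : List String × Int) sentence =>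
      let tokens := PySem.Str.split₀ sentence
      let r := tokens.foldl (fun (st2 : List String × String × Int) token =>
          let token := if PySem.Str.endswith token "." then PySem.Str.slice token none (some (-1)) else token
          let tag := (PySem.Dict.mk annotations).getD token "O"
          let bio_tag := if tag ≠ "O" ∧ (st2.2.1 = "O" ∨ st2.2.1 ≠ tag) then "B-" ++ tag
                         else if tag ≠ "O" then "I-" ++ tag else "O"
          (st2.1 ++ [mkLine st2.2.2 token bio_tag], tag, st2.2.2 + 1)) (st.1, "O", st.2)
      (r.1 ++ [""], r.2.2)) (lines, n)
    = ((sentences.map (tokenTags annotations)).map (labRows "O")).foldl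
        (fun (st : List String × Int) labeled =>
          let r := labeled.foldl (fun (st2 : List String × Int) tb =>
              (st2.1 ++ [mkLine st2.2 tb.1 tb.2], st2.2 + 1)) st
          (r.1 ++ [""], r.2)) (lines, n) := by
  induction sentences with
  | nil => intro lines n; simp
  | cons s ss ih =>
    intro lines n
    simp only [List.foldl_cons, List.map_cons]
    rw [inner_eq annotations (PySem.Str.split₀ s) "O" lines n]
    exact ih _ _

-- ===== VERDICT (by name: the statement is the Claim_ definition above) =====
theorem convert_to_conll_spec : Claim_equal_convert_to_conll := by
  intro annotations raw_text _
  show convert_to_conll annotations raw_text = convert_to_conll_alt annotations raw_text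
  unfold convert_to_conll convert_to_conll_alt
  simp only []
  rw [outer_eq]
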